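-- pv_equiv track=rewrite | github.com/Timothyxxx/NL-Augmenter | filters/gender_bias/filter.py | count_genders
-- ===== SOURCE A (Python) =====
-- def count_genders(flagged_corpus):
--     """
--     count the number of sentences in each of groups
--     :param flagged_corpus: array of flagged sentences
--     :return: 3 integer values, representing feminine, masculine and neutral groups respectively
--     """
--     feminine_count = len(
--         [
--             flag
--             for flag in flagged_corpus
--             if flag.get("feminine_flag") is True
--         ]
--     )
--     masculine_count = len(
--         [
--             flag
--             for flag in flagged_corpus
--             if flag.get("masculine_flag") is True
--         ]
--     )
--     neutral_count = len(
--         [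
--             flag
--             for flag in flagged_corpus
--             if flag.get("neutral_flag") is True
--         ]
--     )
--     return feminine_count, masculine_count, neutral_count
-- ===== SOURCE B (Python) =====
-- def count_genders(flagged_corpus):
--     tally = {}
--     for flag in flagged_corpus:
--         for key, value in flag.items():
--             if value is True:
--                 tally[key] = tally.get(key, 0) + 1
--     return (
--         tally.get("feminine_flag", 0),
--         tally.get("masculine_flag", 0),
--         tally.get("neutral_flag", 0),
--     )
-- ===== Notes on version B (the rewrite author's own statement) =====
-- stated objective: alternative
-- what changed: B never looks up the three flag keys while scanning: it builds one dict tallying, over all items of all sentences, how many times each key carries the value True, and at the end reads the three counts out of that tally.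
import Mathlib
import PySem

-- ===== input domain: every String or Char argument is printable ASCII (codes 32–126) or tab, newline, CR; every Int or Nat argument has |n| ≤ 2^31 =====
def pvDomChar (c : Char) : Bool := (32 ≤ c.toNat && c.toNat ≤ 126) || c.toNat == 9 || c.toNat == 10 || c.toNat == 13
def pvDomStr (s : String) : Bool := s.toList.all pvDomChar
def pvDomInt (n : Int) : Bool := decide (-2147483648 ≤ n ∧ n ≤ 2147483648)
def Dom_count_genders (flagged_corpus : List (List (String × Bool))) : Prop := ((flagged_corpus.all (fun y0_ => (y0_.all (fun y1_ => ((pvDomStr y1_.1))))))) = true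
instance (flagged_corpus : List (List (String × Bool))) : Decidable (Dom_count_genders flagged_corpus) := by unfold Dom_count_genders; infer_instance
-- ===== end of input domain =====

-- B replaces A's three filtered scans with one tally dict keyed by flag name, built over all items and read out at the end (alternative algorithm, same cost).


-- ===== PORT A =====
-- A: three list comprehensions, each filtering by `flag.get("…") is True`, then len of each.
def count_genders (flagged_corpus : List (List (String × Bool))) : Int × Int × Int :=
  let feminine_count : Int :=
    (flagged_corpus.filter (fun flag => (PySem.Dict.mk flag).get? "feminine_flag" == some true)).length
  let masculine_count : Int :=
    (flagged_corpus.filter (fun flag => (PySem.Dict.mk flag).get? "masculine_flag" == some true)).length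
  let neutral_count : Int :=
    (flagged_corpus.filter (fun flag => (PySem.Dict.mk flag).get? "neutral_flag" == some true)).length
  (feminine_count, masculine_count, neutral_count)

-- ===== PORT B =====
-- flag.items(): the items of the dict an assoc list denotes (first occurrence of each key
-- wins, per the dict-as-assoc-list convention); on unique-key lists this is the list itself.
def pvDictItemsAux : List String → List (String × Bool) → List (String × Bool)
  | _, [] => []
  | seen, p :: rest =>
    if p.1 ∈ seen then pvDictItemsAux seen rest
    else p :: pvDictItemsAux (p.1 :: seen) rest

def pvDictItems (l : List (String × Bool)) : List (String × Bool) := pvDictItemsAux [] l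

-- `if value is True: tally[key] = tally.get(key, 0) + 1` for one item
def pvTallyStep (d : PySem.Dict String Int) (p : String × Bool) : PySem.Dict String Int :=
  if p.2 then d.insert p.1 (d.getD p.1 0 + 1) else d

-- the inner loop: tally all items of one sentence
def pvTallySentence (d : PySem.Dict String Int) (flag : List (String × Bool)) : PySem.Dict String Int :=
  (pvDictItems flag).foldl pvTallyStep d

-- B: one tally dict `key ↦ number of sentences whose item (key, True) occurs`, read out at the end.
def count_genders_alt (flagged_corpus : List (List (String × Bool))) : Int × Int × Int :=
  let tally : PySem.Dict String Int := flagged_corpus.foldl pvTallySentence PySem.Dict.empty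
  (tally.getD "feminine_flag" 0, tally.getD "masculine_flag" 0, tally.getD "neutral_flag" 0)

-- ===== PRECONDITION & SPEC =====
def Spec_count_genders (flagged_corpus : List (List (String × Bool))) (out : Int × Int × Int) : Prop := out = count_genders_alt flagged_corpus
instance (flagged_corpus : List (List (String × Bool))) (out : Int × Int × Int) : Decidable (Spec_count_genders flagged_corpus out) := by unfold Spec_count_genders; infer_instance

-- ===== CLAIM =====
def Claim_equal_count_genders : Prop := ∀ (flagged_corpus : List (List (String × Bool))), Dom_count_genders flagged_corpus → Spec_count_genders flagged_corpus (count_genders flagged_corpus)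

-- ===== LEMMAS AND PROOFS =====

-- counting (k, True) items in the not-yet-seen part of the deduplication
theorem countP_pvDictItemsAux (l : List (String × Bool)) (seen : List String) (k : String) :
    (pvDictItemsAux seen l).countP (fun p => p.1 == k && p.2) =
      if k ∈ seen then 0 else if (PySem.Dict.mk l).get? k = some true then 1 else 0 := by
  induction l generalizing seen with
  | nil => by_cases h : k ∈ seen <;> simp [pvDictItemsAux, PySem.Dict.get?, h]
  | cons p rest ih =>
    obtain ⟨b, v⟩ := p
    rw [pvDictItemsAux, PySem.Dict.get?_mk_cons]
    by_cases hb : b ∈ seen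
    · rw [if_pos hb, ih]
      by_cases hk : k ∈ seen
      · simp [hk]
      · have : b ≠ k := fun e => hk (e ▸ hb)
        simp [hk, this]
    · rw [if_neg hb, List.countP_cons, ih]
      by_cases hk : k = b
      · subst hk
        have : k ∉ seen := hb
        cases v <;> simp [this]
      · by_cases hks : k ∈ seen <;>
          simp [hks, hk, Ne.symm hk, List.mem_cons]

-- the deduplicated items carry (k, True) exactly once iff the dict's first match at k is True
theorem countP_pvDictItems (l : List (String × Bool)) (k : String) :
    (pvDictItems l).countP (fun p => p.1 == k && p.2) =
      (if (PySem.Dict.mk l).get? k = some true then 1 else 0) := by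
  rw [pvDictItems, countP_pvDictItemsAux]
  simp

-- the conditional tally loop over an item list adds, at each key, the count of (k, True) items
theorem getD_foldl_items (l : List (String × Bool)) (d : PySem.Dict String Int) (k : String) :
    (l.foldl pvTallyStep d).getD k 0
      = d.getD k 0 + (l.countP (fun p => p.1 == k && p.2) : Int) := by
  induction l generalizing d with
  | nil => simp
  | cons p rest ih =>
    obtain ⟨b, v⟩ := p
    rw [List.foldl_cons, ih, List.countP_cons]
    unfold pvTallyStep
    cases v with
    | false => simp
    | true =>
      by_cases hk : k = b
      · rw [if_pos rfl, PySem.Dict.getD_insert]; simp [hk]; ring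
      · rw [if_pos rfl, PySem.Dict.getD_insert]; simp [hk, Ne.symm hk]

-- the outer loop accumulates, at each key, the number of sentences whose dict maps it to True
theorem getD_foldl_corpus (xs : List (List (String × Bool))) (d : PySem.Dict String Int) (k : String) :
    (xs.foldl pvTallySentence d).getD k 0
      = d.getD k 0 +
        ((xs.filter (fun flag => (PySem.Dict.mk flag).get? k == some true)).length : Int) := by
  induction xs generalizing d with
  | nil => simp
  | cons flag rest ih =>
    rw [List.foldl_cons, ih]
    unfold pvTallySentence
    rw [getD_foldl_items, countP_pvDictItems, List.filter_cons]
    by_cases h : (PySem.Dict.mk flag).get? k = some true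
    · simp [h]; ring
    · simp [h]

theorem count_genders_eq_alt (xs : List (List (String × Bool))) :
    count_genders xs = count_genders_alt xs := by
  unfold count_genders count_genders_alt
  simp only [getD_foldl_corpus, PySem.Dict.getD_empty, Int.zero_add]

-- ===== VERDICT =====
theorem count_genders_spec : Claim_equal_count_genders := by
  intro xs _
  simpa [Spec_count_genders] using count_genders_eq_alt xs
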